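-- pv_equiv track=rewrite | github.com/pandeabhijitv-ux/Kundalisaga | src/remedy_engine/remedies.py | _get_goal_specific_planets
-- ===== SOURCE A (Python) =====
-- from typing import Dict, List, Optional
--
-- def _get_goal_specific_planets(goal: str) -> List[str]:
--     """Get planets relevant to specific goal for Lal Kitab remedies"""
--     goal_lower = goal.lower() if goal else ''
--
--     # Map goals to relevant planets
--     if any(word in goal_lower for word in ['marriage', 'relationship', 'love', 'partner', 'spouse']):
--         return ['Venus', 'Moon', 'Mars', 'Jupiter']  # 7th house matters
--     elif any(word in goal_lower for word in ['career', 'job', 'profession', 'work']):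
--         return ['Sun', 'Saturn', 'Jupiter', 'Mercury']  # 10th house matters
--     elif any(word in goal_lower for word in ['wealth', 'money', 'finance', 'prosperity']):
--         return ['Jupiter', 'Venus', 'Mercury', 'Moon']  # 2nd/11th house matters
--     elif any(word in goal_lower for word in ['health', 'fitness', 'wellness']):
--         return ['Sun', 'Moon', 'Mars', 'Saturn']  # 1st/6th house matters
--     elif any(word in goal_lower for word in ['education', 'study', 'learning', 'knowledge']):
--         return ['Jupiter', 'Mercury', 'Sun']  # 5th/9th house matters
--     elif any(word in goal_lower for word in ['children', 'pregnancy', 'child']):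
--         return ['Jupiter', 'Moon', 'Sun']  # 5th house matters
--     elif any(word in goal_lower for word in ['spiritual', 'meditation', 'enlightenment']):
--         return ['Jupiter', 'Ketu', 'Moon']  # 9th/12th house matters
--     else:
--         # Return None to show all planets if no specific goal
--         return None
-- ===== SOURCE B (Python) =====
-- KEYWORDS = [
--     ['marriage', 'relationship', 'love', 'partner', 'spouse'],
--     ['career', 'job', 'profession', 'work'],
--     ['wealth', 'money', 'finance', 'prosperity'],
--     ['health', 'fitness', 'wellness'],
--     ['education', 'study', 'learning', 'knowledge'],
--     ['children', 'pregnancy', 'child'],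
--     ['spiritual', 'meditation', 'enlightenment'],
-- ]
-- PLANETS = [
--     ['Venus', 'Moon', 'Mars', 'Jupiter'],
--     ['Sun', 'Saturn', 'Jupiter', 'Mercury'],
--     ['Jupiter', 'Venus', 'Mercury', 'Moon'],
--     ['Sun', 'Moon', 'Mars', 'Saturn'],
--     ['Jupiter', 'Mercury', 'Sun'],
--     ['Jupiter', 'Moon', 'Sun'],
--     ['Jupiter', 'Ketu', 'Moon'],
-- ]
-- # keyword -> index of its goal group
-- KEYWORD_GROUP = [(w, i) for i, ws in enumerate(KEYWORDS) for w in ws]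
--
-- def _get_goal_specific_planets(goal: str):
--     goal_lower = goal.lower() if goal else ''
--     # minimum group index among ALL matching keywords (groups are disjoint in
--     # meaning, and the minimum reproduces the original branch priority)
--     best = min((i for w, i in KEYWORD_GROUP if w in goal_lower), default=None)
--     return PLANETS[best] if best is not None else None
-- ===== Notes on version B (the rewrite author's own statement) =====
-- stated objective: alternative
-- what changed: Instead of a seven-branch if/elif chain with early return, B builds a keyword->group-index table, aggregates the MINIMUM matching group index over all keywords with min(..., default=None), and indexes a planets table with it (program order no longer decides priority; the min does).
import Mathlib
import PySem

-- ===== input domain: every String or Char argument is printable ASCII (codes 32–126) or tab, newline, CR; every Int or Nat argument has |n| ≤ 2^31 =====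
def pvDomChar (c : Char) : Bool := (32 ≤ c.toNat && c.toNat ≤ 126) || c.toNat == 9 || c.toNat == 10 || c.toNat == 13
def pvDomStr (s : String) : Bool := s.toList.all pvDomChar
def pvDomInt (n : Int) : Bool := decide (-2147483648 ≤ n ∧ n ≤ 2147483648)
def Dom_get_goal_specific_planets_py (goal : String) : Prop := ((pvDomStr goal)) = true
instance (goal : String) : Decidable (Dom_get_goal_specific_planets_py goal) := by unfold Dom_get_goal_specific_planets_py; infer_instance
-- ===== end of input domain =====

-- B replaces A's early-return if/elif chain by aggregating the minimum matching group index over a keyword table, then indexing a planets table (objective: alternative).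


-- ===== PORT A =====
def get_goal_specific_planets_py (goal : String) : Option (List String) :=
  let goal_lower := if goal ≠ "" then PySem.Str.lower goal else ""
  if (["marriage", "relationship", "love", "partner", "spouse"].any
      (fun word => PySem.Str.isIn word goal_lower)) then
    some ["Venus", "Moon", "Mars", "Jupiter"]
  else if (["career", "job", "profession", "work"].any
      (fun word => PySem.Str.isIn word goal_lower)) then
    some ["Sun", "Saturn", "Jupiter", "Mercury"]
  else if (["wealth", "money", "finance", "prosperity"].any
      (fun word => PySem.Str.isIn word goal_lower)) then
    some ["Jupiter", "Venus", "Mercury", "Moon"]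
  else if (["health", "fitness", "wellness"].any
      (fun word => PySem.Str.isIn word goal_lower)) then
    some ["Sun", "Moon", "Mars", "Saturn"]
  else if (["education", "study", "learning", "knowledge"].any
      (fun word => PySem.Str.isIn word goal_lower)) then
    some ["Jupiter", "Mercury", "Sun"]
  else if (["children", "pregnancy", "child"].any
      (fun word => PySem.Str.isIn word goal_lower)) then
    some ["Jupiter", "Moon", "Sun"]
  else if (["spiritual", "meditation", "enlightenment"].any
      (fun word => PySem.Str.isIn word goal_lower)) then
    some ["Jupiter", "Ketu", "Moon"]
  else
    none

-- ===== PORT B =====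
def pvKeywords : List (List String) :=
  [ ["marriage", "relationship", "love", "partner", "spouse"],
    ["career", "job", "profession", "work"],
    ["wealth", "money", "finance", "prosperity"],
    ["health", "fitness", "wellness"],
    ["education", "study", "learning", "knowledge"],
    ["children", "pregnancy", "child"],
    ["spiritual", "meditation", "enlightenment"] ]

def pvPlanets : List (List String) :=
  [ ["Venus", "Moon", "Mars", "Jupiter"],
    ["Sun", "Saturn", "Jupiter", "Mercury"],
    ["Jupiter", "Venus", "Mercury", "Moon"],
    ["Sun", "Moon", "Mars", "Saturn"],
    ["Jupiter", "Mercury", "Sun"],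
    ["Jupiter", "Moon", "Sun"],
    ["Jupiter", "Ketu", "Moon"] ]

-- KEYWORD_GROUP = [(w, i) for i, ws in enumerate(KEYWORDS) for w in ws]
def pvKeywordGroup : List (String × Nat) :=
  (pvKeywords.zipIdx).flatMap (fun p => p.1.map (fun w => (w, p.2)))

-- running minimum for Python's min(..., default=None) over a stream
def pvMinOpt (o : Option Nat) (i : Nat) : Option Nat :=
  some (match o with | none => i | some j => min j i)

def get_goal_specific_planets_py_alt (goal : String) : Option (List String) :=
  let goal_lower := if goal ≠ "" then PySem.Str.lower goal else ""
  let best := pvKeywordGroup.foldl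
    (fun acc wg => if PySem.Str.isIn wg.1 goal_lower then pvMinOpt acc wg.2 else acc) none
  -- PLANETS[best]: best is always a valid index (0..6), so getD is exact here
  best.map (fun k => pvPlanets.getD k [])

-- ===== PRECONDITION & SPEC =====
def Spec_get_goal_specific_planets_py (goal : String) (out : Option (List String)) : Prop := out = get_goal_specific_planets_py_alt goal
instance (goal : String) (out : Option (List String)) : Decidable (Spec_get_goal_specific_planets_py goal out) := by unfold Spec_get_goal_specific_planets_py; infer_instance

-- ===== CLAIM (what is proved, stated in full; the proofs are below) =====
def Claim_equal_get_goal_specific_planets_py : Prop := ∀ (goal : String), Dom_get_goal_specific_planets_py goal → Spec_get_goal_specific_planets_py goal (get_goal_specific_planets_py goal)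

-- ===== LEMMAS AND PROOFS =====

theorem pvMinOpt_idem (acc : Option Nat) (i : Nat) :
    pvMinOpt (pvMinOpt acc i) i = pvMinOpt acc i := by
  cases acc <;> simp [pvMinOpt]

-- the keyword table is the seven keyword groups tagged with their indices
theorem pvKG_eq : pvKeywordGroup =
    (["marriage", "relationship", "love", "partner", "spouse"].map (fun w => (w, (0 : Nat)))) ++
    ((["career", "job", "profession", "work"].map (fun w => (w, (1 : Nat)))) ++
    ((["wealth", "money", "finance", "prosperity"].map (fun w => (w, (2 : Nat)))) ++
    ((["health", "fitness", "wellness"].map (fun w => (w, (3 : Nat)))) ++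
    ((["education", "study", "learning", "knowledge"].map (fun w => (w, (4 : Nat)))) ++
    ((["children", "pregnancy", "child"].map (fun w => (w, (5 : Nat)))) ++
    (["spiritual", "meditation", "enlightenment"].map (fun w => (w, (6 : Nat))))))))) := by
  rfl

-- folding the running minimum over one keyword group (constant index i)
theorem pvSeg (gl : String) (ws : List String) (i : Nat) (acc : Option Nat) :
    List.foldl (fun acc (wg : String × Nat) =>
        if PySem.Str.isIn wg.1 gl then pvMinOpt acc wg.2 else acc) acc
      (ws.map (fun w => (w, i)))
    = if ws.any (fun w => PySem.Str.isIn w gl) then pvMinOpt acc i else acc := by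
  induction ws generalizing acc with
  | nil => rfl
  | cons w ws ih =>
    rw [List.map_cons, List.foldl_cons, List.any_cons, ih]
    cases hc : PySem.Str.isIn w gl <;>
      cases ha : ws.any (fun w => PySem.Str.isIn w gl) <;>
      simp only [Bool.true_or, Bool.false_or, if_true, pvMinOpt_idem] <;> rfl

-- ===== VERDICT (by name: the statement is the Claim_ definition above) =====
theorem get_goal_specific_planets_py_spec : Claim_equal_get_goal_specific_planets_py := by
  intro goal _
  unfold Spec_get_goal_specific_planets_py get_goal_specific_planets_py get_goal_specific_planets_py_alt
  simp only [pvKG_eq, List.foldl_append, pvSeg]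
  cases h0 : (["marriage", "relationship", "love", "partner", "spouse"].any
      (fun w => PySem.Str.isIn w (if goal ≠ "" then PySem.Str.lower goal else ""))) <;>
  cases h1 : (["career", "job", "profession", "work"].any
      (fun w => PySem.Str.isIn w (if goal ≠ "" then PySem.Str.lower goal else ""))) <;>
  cases h2 : (["wealth", "money", "finance", "prosperity"].any
      (fun w => PySem.Str.isIn w (if goal ≠ "" then PySem.Str.lower goal else ""))) <;>
  cases h3 : (["health", "fitness", "wellness"].any
      (fun w => PySem.Str.isIn w (if goal ≠ "" then PySem.Str.lower goal else ""))) <;>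
  cases h4 : (["education", "study", "learning", "knowledge"].any
      (fun w => PySem.Str.isIn w (if goal ≠ "" then PySem.Str.lower goal else ""))) <;>
  cases h5 : (["children", "pregnancy", "child"].any
      (fun w => PySem.Str.isIn w (if goal ≠ "" then PySem.Str.lower goal else ""))) <;>
  cases h6 : (["spiritual", "meditation", "enlightenment"].any
      (fun w => PySem.Str.isIn w (if goal ≠ "" then PySem.Str.lower goal else ""))) <;>
  rfl
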